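-- pv_equiv track=rewrite | github.com/GridTools/gt4py | src/gt4py/backend/gtc_backend/base.py | make_x86_layout_map
-- ===== SOURCE A (Python) =====
-- from typing import TYPE_CHECKING, Any, Dict, List, Optional, Tuple, Type, Union
--
-- def make_x86_layout_map(mask: Tuple[int, ...]) -> Tuple[Optional[int], ...]:
--     ctr = iter(range(sum(mask)))
--     if len(mask) < 3:
--         layout: List[Optional[int]] = [next(ctr) if m else None for m in mask]
--     else:
--         swapped_mask: List[Optional[int]] = [*mask[3:], *mask[:3]]
--         layout = [next(ctr) if m else None for m in swapped_mask]
--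
--         layout = [*layout[-3:], *layout[:-3]]
--
--     return tuple(layout)
-- ===== SOURCE B (Python) =====
-- def make_x86_layout_map(mask):
--     # single pass: truthy tail entries (index >= 3) are numbered 0,1,... ;
--     # truthy head entries (index < 3) continue after them.
--     t = sum(1 for m in mask[3:] if m)
--     out = []
--     head, tail = t, 0
--     for i, m in enumerate(mask):
--         if not m:
--             out.append(None)
--         elif i < 3:
--             out.append(head)
--             head += 1
--         else:
--             out.append(tail)
--             tail += 1
--     return tuple(out)
-- ===== Notes on version B (the rewrite author's own statement) =====
-- stated objective: simpler
-- what changed: B replaces A's build-swapped-list + renumber + rotate-back-by-3 pipeline with one pass over the mask in natural order maintaining two counters (head counter starting at the count of truthy tail entries, tail counter starting at 0), unifying the len<3 special case.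
import Mathlib
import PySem

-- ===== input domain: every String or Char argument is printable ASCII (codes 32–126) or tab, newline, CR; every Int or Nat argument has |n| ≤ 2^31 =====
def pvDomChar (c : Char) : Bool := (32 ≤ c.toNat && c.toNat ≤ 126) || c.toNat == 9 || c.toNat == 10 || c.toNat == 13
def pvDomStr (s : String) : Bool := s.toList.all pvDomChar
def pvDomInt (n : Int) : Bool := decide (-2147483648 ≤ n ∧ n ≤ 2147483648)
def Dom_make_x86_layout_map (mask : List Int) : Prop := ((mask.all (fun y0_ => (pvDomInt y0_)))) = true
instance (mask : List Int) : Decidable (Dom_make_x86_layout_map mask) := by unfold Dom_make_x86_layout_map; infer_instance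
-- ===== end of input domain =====

-- B replaces A's swapped-list + rotate-back pipeline with one natural-order pass keeping two
-- counters (objective: simpler). Equivalence is claimed on Pre_ (A raises StopIteration outside it).

-- ===== PORT A =====
-- The comprehension '[next(ctr) if m else None for m in xs]' where ctr yields 0,1,2,… :
-- the range bound sum(mask) is exhausted only outside Pre_make_x86_layout_map (where Python
-- raises StopIteration), so the counter is modelled unbounded; exact on Pre_.
def aLoop (k : Int) : List Int → List (Option Int)
  | [] => []
  | m :: xs => if m ≠ 0 then some k :: aLoop (k + 1) xs else none :: aLoop k xs

def make_x86_layout_map (mask : List Int) : List (Option Int) :=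
  if mask.length < 3 then
    aLoop 0 mask
  else
    let swapped_mask := PySem.List.slice mask (some 3) none ++ PySem.List.slice mask none (some 3)
    let layout := aLoop 0 swapped_mask
    PySem.List.slice layout (some (-3)) none ++ PySem.List.slice layout none (some (-3))

-- ===== PORT B =====
-- loop of Source B: index i, head counter h, tail counter t
def bLoop (i h t : Int) : List Int → List (Option Int)
  | [] => []
  | m :: xs =>
    if m = 0 then none :: bLoop (i + 1) h t xs
    else if i < 3 then some h :: bLoop (i + 1) (h + 1) t xs
    else some t :: bLoop (i + 1) h (t + 1) xs

def make_x86_layout_map_alt (mask : List Int) : List (Option Int) :=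
  let t : Int := ((PySem.List.slice mask (some 3) none).countP (· != 0) : Int)
  bLoop 0 t 0 mask

-- ===== PRECONDITION & SPEC =====
-- Pre_ excludes exactly the masks on which A raises StopIteration: those whose integer sum is
-- smaller than the number of truthy (nonzero) entries.
def Pre_make_x86_layout_map (mask : List Int) : Prop :=
  ((mask.countP (· != 0) : Int)) ≤ mask.sum
instance (mask : List Int) : Decidable (Pre_make_x86_layout_map mask) := by
  unfold Pre_make_x86_layout_map; infer_instance

def pvWitness_make_x86_layout_map : List Int := [0, 1, 1, 0, 1]

def Spec_make_x86_layout_map (mask : List Int) (out : List (Option Int)) : Prop :=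
  out = make_x86_layout_map_alt mask
instance (mask : List Int) (out : List (Option Int)) : Decidable (Spec_make_x86_layout_map mask out) := by
  unfold Spec_make_x86_layout_map; infer_instance

-- ===== CLAIM (what is proved, stated in full; the proofs are below) =====
def Claim_equal_make_x86_layout_map : Prop :=
  ∀ (mask : List Int), Dom_make_x86_layout_map mask → Pre_make_x86_layout_map mask →
    Spec_make_x86_layout_map mask (make_x86_layout_map mask)

-- ===== LEMMAS AND PROOFS =====

lemma aLoop_append (xs ys : List Int) : ∀ k : Int,
    aLoop k (xs ++ ys) = aLoop k xs ++ aLoop (k + (xs.countP (· != 0) : Int)) ys := by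
  induction xs with
  | nil => intro k; simp [aLoop]
  | cons m xs ih =>
      intro k
      by_cases hm : m = 0
      · simp [aLoop, hm, ih]
      · simp only [List.cons_append, aLoop, if_pos hm, List.countP_cons, ih]
        have : (m != 0) = true := by simp [hm]
        simp [this]
        ring_nf

lemma aLoop_length (k : Int) (xs : List Int) : (aLoop k xs).length = xs.length := by
  induction xs generalizing k with
  | nil => simp [aLoop]
  | cons m xs ih => by_cases hm : m = 0 <;> simp [aLoop, hm, ih]

lemma bLoop_tail (xs : List Int) : ∀ (i h t : Int), 3 ≤ i → bLoop i h t xs = aLoop t xs := by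
  induction xs with
  | nil => intro i h t _; simp [bLoop, aLoop]
  | cons m xs ih =>
      intro i h t hi
      by_cases hm : m = 0
      · simp [bLoop, aLoop, hm, ih (i + 1) h t (by omega)]
      · simp [bLoop, aLoop, hm, if_neg (by omega : ¬ i < 3), ih (i + 1) h (t + 1) (by omega)]

lemma bLoop_head3 (a b c : Int) (rest : List Int) (h t : Int) :
    bLoop 0 h t (a :: b :: c :: rest) = aLoop h [a, b, c] ++ aLoop t rest := by
  by_cases ha : a = 0 <;> by_cases hb : b = 0 <;> by_cases hc : c = 0 <;>
    simp [bLoop, aLoop, ha, hb, hc, bLoop_tail _ 3 _ _ (by omega)]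

-- ===== VERDICT (by name: the statement is the Claim_ definition above) =====
theorem make_x86_layout_map_spec : Claim_equal_make_x86_layout_map := by
  intro mask _ _
  unfold Spec_make_x86_layout_map make_x86_layout_map make_x86_layout_map_alt
  rcases mask with _ | ⟨a, _ | ⟨b, _ | ⟨c, rest⟩⟩⟩
  · simp [aLoop, bLoop, PySem.List.slice_from _ (by norm_num : (0:Int) ≤ 3)]
  · by_cases ha : a = 0 <;> simp [aLoop, bLoop, ha]
  · by_cases ha : a = 0 <;> by_cases hb : b = 0 <;>
      simp [aLoop, bLoop, ha, hb, PySem.List.slice_from _ (by norm_num : (0:Int) ≤ 3)]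
  · have hlen : ¬ (a :: b :: c :: rest).length < 3 := by simp
    rw [if_neg hlen]
    rw [PySem.List.slice_from _ (by norm_num : (0:Int) ≤ 3),
        PySem.List.slice_to _ (by norm_num : (0:Int) ≤ 3)]
    have h3 : ((3:Int)).toNat = 3 := rfl
    simp only [h3, List.drop_succ_cons, List.drop_zero, List.take_succ_cons, List.take_zero]
    rw [PySem.List.slice_from_neg_ofNat _ 3 (by norm_num),
        PySem.List.slice_to_neg_ofNat _ 3 (by norm_num)]
    rw [bLoop_head3, aLoop_append]
    have hL : (aLoop 0 rest ++ aLoop (0 + (rest.countP (· != 0) : Int)) [a, b, c]).length - 3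
        = (aLoop 0 rest).length := by
      rw [List.length_append, aLoop_length, aLoop_length]
      simp
    rw [hL, List.drop_left, List.take_left]
    norm_num
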